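-- pv_equiv track=rewrite | github.com/ZiadJanpih/Data_Protection_and_Privacy | KDgree.py | DPA_GetAnonymizedDegrees_Optimized
-- ===== SOURCE A (Python) =====
-- import operator
--
-- def Identical(d):
--     cost =sum(d[0][1]-d[i][1] for i in range(len(d)))
--     I = [(d[i][0],d[0][1]) for i in range(len(d))]
--     return cost, I
--
-- def DPA_GetAnonymizedDegrees_Optimized(d, k):
--     nodesCount = len(d)
--
--     if  nodesCount < 2*k:
--         return Identical(d)
--     else:
--         pairs=[]
--         min_t=max(k,(nodesCount - 2*k+1))
--         for t in range( min_t , nodesCount-k+1 , 1):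
--             DAcost,DA_d =DPA_GetAnonymizedDegrees_Optimized(d[0:t],k)
--             DA_Icost,DA_Id=Identical(d[t:nodesCount])
--             All_cost=DAcost+DA_Icost
--             All_d=DA_d+DA_Id
--             Icost,Id=Identical(d[0:nodesCount])
--             if(All_cost >Icost ):
--                 pairs.append((Icost,Id))
--             else:
--                 pairs.append((All_cost,All_d))
--
--         return   min(pairs, key=operator.itemgetter(0))
-- ===== SOURCE B (Python) =====
-- def DPA_GetAnonymizedDegrees_Optimized(d, k):
--     # Bottom-up DP over prefix lengths instead of A's exponential recursion on slices.
--     n = len(d)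
--
--     def ident(seg):
--         if not seg:
--             return 0, []
--         top = seg[0][1]
--         return sum(top - deg for _, deg in seg), [(node, top) for node, _ in seg]
--
--     best = []  # best[m] = anonymization of the prefix d[:m]
--     for m in range(n + 1):
--         if m < 2 * k:
--             best.append(ident(d[:m]))
--             continue
--         icost, ig = ident(d[:m])
--         cand = None
--         for t in range(max(k, m - 2 * k + 1), m - k + 1):
--             pc, pg = best[t]
--             sc, sg = ident(d[t:m])
--             total = pc + sc
--             cur = (icost, ig) if total > icost else (total, pg + sg)
--             if cand is None or cur[0] < cand[0]:
--                 cand = cur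
--         best.append(cand)
--     return best[n]
-- ===== Notes on version B (the rewrite author's own statement) =====
-- stated objective: alternative
-- what changed: Replaces A's recursion over prefix slices (which re-solves the same prefix subproblems many times) with a bottom-up dynamic program that fills a table of answers for each prefix length exactly once.
import Mathlib
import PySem

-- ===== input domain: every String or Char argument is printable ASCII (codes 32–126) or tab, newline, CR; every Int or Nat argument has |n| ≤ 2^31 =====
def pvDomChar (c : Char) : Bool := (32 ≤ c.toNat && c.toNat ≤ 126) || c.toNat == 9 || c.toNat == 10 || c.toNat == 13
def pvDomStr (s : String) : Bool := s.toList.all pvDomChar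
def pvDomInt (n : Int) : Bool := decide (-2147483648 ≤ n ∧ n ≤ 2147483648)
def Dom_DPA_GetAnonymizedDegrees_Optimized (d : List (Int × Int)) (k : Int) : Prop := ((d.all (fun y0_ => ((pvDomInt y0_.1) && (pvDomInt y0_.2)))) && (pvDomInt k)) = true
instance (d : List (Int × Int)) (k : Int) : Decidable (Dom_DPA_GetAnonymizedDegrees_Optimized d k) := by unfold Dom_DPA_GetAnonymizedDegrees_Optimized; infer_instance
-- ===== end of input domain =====

-- B replaces A's recursion over prefix slices (which re-solves the same prefix
-- subproblems over and over) by a bottom-up DP over prefix lengths that computes each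
-- prefix's answer exactly once (objective: alternative algorithm).

-- ===== PORT A =====
-- Identical(d): cost = sum(d[0][1]-d[i][1] for i in range(len(d))); I = [(d[i][0],d[0][1]) ...]
def pvIdenticalA (d : List (Int × Int)) : Int × List (Int × Int) :=
  let cost := (PySem.List.pyRange 0 (PySem.List.len d) 1).foldl
    (fun acc i => acc + ((PySem.List.pyGetD d 0 (0, 0)).2 - (PySem.List.pyGetD d i (0, 0)).2)) 0
  let I := (PySem.List.pyRange 0 (PySem.List.len d) 1).map
    (fun i => ((PySem.List.pyGetD d i (0, 0)).1, (PySem.List.pyGetD d 0 (0, 0)).2))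
  (cost, I)

-- A's recursion, fuel-guarded for totality (fuel = len d + 1 always suffices: each
-- recursive call is on a strictly shorter prefix d[0:t], t < len d).
-- 'min(pairs, key=itemgetter(0))' is PySem.List.min?; it raises on an empty 'pairs'
-- (exactly when k <= 0), so the .getD default is only reached outside Pre_.
def pvAuxA : Nat → List (Int × Int) → Int → Int × List (Int × Int)
  | 0, _, _ => (0, [])
  | fuel + 1, d, k =>
    let nodesCount : Int := PySem.List.len d
    if nodesCount < 2 * k then pvIdenticalA d
    else
      let min_t := max k (nodesCount - 2 * k + 1)
      let pairs := (PySem.List.pyRange min_t (nodesCount - k + 1) 1).foldl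
        (fun pairs t =>
          let DA := pvAuxA fuel (PySem.List.slice d (some 0) (some t)) k
          let DAI := pvIdenticalA (PySem.List.slice d (some t) (some nodesCount))
          let All_cost := DA.1 + DAI.1
          let All_d := DA.2 ++ DAI.2
          let I := pvIdenticalA (PySem.List.slice d (some 0) (some nodesCount))
          if All_cost > I.1 then pairs ++ [(I.1, I.2)] else pairs ++ [(All_cost, All_d)]) []
      (PySem.List.min? pairs (fun p => p.1)).getD (0, [])

def DPA_GetAnonymizedDegrees_Optimized (d : List (Int × Int)) (k : Int) : Int × (List (Int × Int)) :=
  pvAuxA (d.length + 1) d k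

-- ===== PORT B =====
-- ident(seg) of Source B
def pvIdentB (seg : List (Int × Int)) : Int × List (Int × Int) :=
  match seg with
  | [] => (0, [])
  | x :: _ =>
    let top := x.2
    (seg.foldl (fun acc p => acc + (top - p.2)) 0, seg.map (fun p => (p.1, top)))

-- one iteration of Source B's outer loop: the DP value for the prefix d[:m], reading earlier
-- cells through 'lookup' (Source B's best[t]).  Source B's 'cand is None' bookkeeping is the
-- Option fold; cand = None survives only when k <= 0 (outside Pre_), where the .getD
-- stands in for Source B's None.
def pvCellB (d : List (Int × Int)) (k : Int)
    (lookup : Int → Int × List (Int × Int)) (m : Int) : Int × List (Int × Int) :=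
  if m < 2 * k then pvIdentB (PySem.List.slice d none (some m))
  else
    let I := pvIdentB (PySem.List.slice d none (some m))
    let cand := (PySem.List.pyRange (max k (m - 2 * k + 1)) (m - k + 1) 1).foldl
      (fun cand t =>
        let p := lookup t
        let s := pvIdentB (PySem.List.slice d (some t) (some m))
        let total := p.1 + s.1
        let cur := if total > I.1 then (I.1, I.2) else (total, p.2 ++ s.2)
        match cand with
        | none => some cur
        | some c => if cur.1 < c.1 then some cur else some c)
      (none : Option (Int × List (Int × Int)))
    cand.getD (0, [])

def DPA_GetAnonymizedDegrees_Optimized_alt (d : List (Int × Int)) (k : Int) : Int × (List (Int × Int)) :=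
  let best := (PySem.List.pyRange 0 ((d.length : Int) + 1) 1).foldl
    (fun best m => best ++ [pvCellB d k (fun t => PySem.List.pyGetD best t (0, [])) m]) []
  PySem.List.pyGetD best (d.length : Int) (0, [])

-- ===== PRECONDITION & SPEC =====
-- Pre_ excludes k <= 0 (then len d >= 2k always holds, the candidate range is empty and
-- Python's min([]) raises ValueError; Source B returns None there, not a pair).
def Pre_DPA_GetAnonymizedDegrees_Optimized (d : List (Int × Int)) (k : Int) : Prop := 1 ≤ k
instance (d : List (Int × Int)) (k : Int) : Decidable (Pre_DPA_GetAnonymizedDegrees_Optimized d k) := by unfold Pre_DPA_GetAnonymizedDegrees_Optimized; infer_instance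
def pvWitness_DPA_GetAnonymizedDegrees_Optimized : (List (Int × Int)) × Int := ([(1, 2), (2, 1), (3, 3), (4, 1)], 2)

def Spec_DPA_GetAnonymizedDegrees_Optimized (d : List (Int × Int)) (k : Int) (out : Int × (List (Int × Int))) : Prop := out = DPA_GetAnonymizedDegrees_Optimized_alt d k
instance (d : List (Int × Int)) (k : Int) (out : Int × (List (Int × Int))) : Decidable (Spec_DPA_GetAnonymizedDegrees_Optimized d k out) := by unfold Spec_DPA_GetAnonymizedDegrees_Optimized; infer_instance

-- ===== CLAIM (what is proved, stated in full; the proofs are below) =====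
def Claim_equal_DPA_GetAnonymizedDegrees_Optimized : Prop := ∀ (d : List (Int × Int)) (k : Int), Dom_DPA_GetAnonymizedDegrees_Optimized d k → Pre_DPA_GetAnonymizedDegrees_Optimized d k → Spec_DPA_GetAnonymizedDegrees_Optimized d k (DPA_GetAnonymizedDegrees_Optimized d k)

-- ===== LEMMAS AND PROOFS =====

-- A's Identical equals Source B's ident on every list.
theorem pvIdentAB (l : List (Int × Int)) : pvIdenticalA l = pvIdentB l := by
  match l with
  | [] => rfl
  | x :: t =>
    unfold pvIdenticalA pvIdentB
    simp only [PySem.List.len_eq, PySem.List.pyGetD_zero_cons]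
    refine Prod.ext ?_ ?_
    · exact PySem.List.foldl_pyRange_zero_pyGetD' (x :: t) (0, 0) (fun acc p => acc + (x.2 - p.2)) 0
    · show List.map ((fun p => (p.1, x.2)) ∘ (fun i => PySem.List.pyGetD (x :: t) i (0, 0))) _ = _
      rw [← List.map_map, PySem.List.map_pyGetD_pyRange_zero']

-- reference DP value of the prefix d[:m]: Source B's cell, with recursive lookups (fuel-guarded)
def pvBVal : Nat → List (Int × Int) → Int → Nat → Int × List (Int × Int)
  | 0, _, _, _ => (0, [])
  | fuel + 1, d, k, m => pvCellB d k (fun t => pvBVal fuel d k t.toNat) (m : Int)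

-- membership in the candidate range forces 1 ≤ k and k ≤ t ≤ m - k
theorem pvRangeFacts {k m t : Int} (h1 : max k (m - 2 * k + 1) ≤ t) (h2 : t < m - k + 1) :
    1 ≤ k ∧ k ≤ t ∧ t ≤ m - k := by
  have := le_max_left k (m - 2 * k + 1)
  have := le_max_right k (m - 2 * k + 1)
  omega

theorem pvCellB_congr (d : List (Int × Int)) (k : Int)
    (l₁ l₂ : Int → Int × List (Int × Int)) (m : Int)
    (h : ∀ t, max k (m - 2 * k + 1) ≤ t → t < m - k + 1 → l₁ t = l₂ t) :
    pvCellB d k l₁ m = pvCellB d k l₂ m := by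
  unfold pvCellB
  split
  · rfl
  · dsimp only
    congr 1
    apply PySem.List.foldl_congr_mem
    intro acc t ht
    rw [PySem.List.mem_pyRange_one] at ht
    rw [h t ht.1 ht.2]

theorem pvBVal_mono (d : List (Int × Int)) (k : Int) :
    ∀ m f g, m < f → m < g → pvBVal f d k m = pvBVal g d k m := by
  intro m
  induction m using Nat.strong_induction_on with
  | _ m ih =>
    intro f g hf hg
    obtain ⟨f', rfl⟩ : ∃ f', f = f' + 1 := ⟨f - 1, by omega⟩
    obtain ⟨g', rfl⟩ : ∃ g', g = g' + 1 := ⟨g - 1, by omega⟩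
    show pvCellB _ _ _ _ = pvCellB _ _ _ _
    apply pvCellB_congr
    intro t h1 h2
    obtain ⟨hk, hkt, htm⟩ := pvRangeFacts h1 h2
    exact ih t.toNat (by omega) f' g' (by omega) (by omega)

-- the element A's loop appends for candidate split point t (on list X = d.take m, n = len X)
def pvHA (X : List (Int × Int)) (k : Int) (fuel : Nat) (n t : Int) : Int × List (Int × Int) :=
  let DA := pvAuxA fuel (PySem.List.slice X (some 0) (some t)) k
  let DAI := pvIdenticalA (PySem.List.slice X (some t) (some n))
  let All_cost := DA.1 + DAI.1
  let All_d := DA.2 ++ DAI.2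
  let I := pvIdenticalA (PySem.List.slice X (some 0) (some n))
  if All_cost > I.1 then (I.1, I.2) else (All_cost, All_d)

-- the candidate Source B's inner loop builds for split point t
def pvHB (d : List (Int × Int)) (k : Int) (lookup : Int → Int × List (Int × Int)) (m t : Int) :
    Int × List (Int × Int) :=
  let p := lookup t
  let s := pvIdentB (PySem.List.slice d (some t) (some m))
  let total := p.1 + s.1
  let I := pvIdentB (PySem.List.slice d none (some m))
  if total > I.1 then (I.1, I.2) else (total, p.2 ++ s.2)

def pvOptStep (cand : Option (Int × List (Int × Int))) (x : Int × List (Int × Int)) :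
    Option (Int × List (Int × Int)) :=
  match cand with
  | none => some x
  | some c => if x.1 < c.1 then some x else some c

-- Python's min(..., key=itemgetter(0)) over a mapped list IS the first-minimum option fold
theorem pvMinFold (R : List Int) (h : Int → Int × List (Int × Int)) (dflt : Int × List (Int × Int)) :
    (PySem.List.min? (R.map h) (fun p => p.1)).getD dflt =
    (R.foldl (fun cand t => pvOptStep cand (h t)) none).getD dflt := by
  simp only [PySem.List.min?, List.foldl_map]
  congr 1
  apply PySem.List.foldl_congr_mem
  intro acc x _
  cases acc <;> rfl

theorem pvCellB_else (d : List (Int × Int)) (k : Int) (lookup : Int → Int × List (Int × Int))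
    (m : Int) (h : ¬ m < 2 * k) :
    pvCellB d k lookup m =
    ((PySem.List.pyRange (max k (m - 2 * k + 1)) (m - k + 1) 1).foldl
      (fun cand t => pvOptStep cand (pvHB d k lookup m t)) none).getD (0, []) := by
  unfold pvCellB
  rw [if_neg h]
  dsimp only
  congr 1

-- the two per-candidate values agree
theorem pvElem (d : List (Int × Int)) (k : Int) (fuel : Nat) (m : Nat) (hm : m ≤ d.length)
    (t : Int) (h0 : 0 ≤ t) (htm : t ≤ (m : Int))
    (hIH : pvAuxA fuel (d.take t.toNat) k = pvBVal fuel d k t.toNat) :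
    pvHA (d.take m) k fuel (m : Int) t = pvHB d k (fun u => pvBVal fuel d k u.toNat) (m : Int) t := by
  have hs1 : PySem.List.slice (d.take m) (some 0) (some t) = d.take t.toNat := by
    rw [PySem.List.slice_zero_start, PySem.List.slice_to _ h0, List.take_take,
        Nat.min_eq_left (by omega)]
  have hs2 : PySem.List.slice (d.take m) (some t) (some (m : Int)) =
      PySem.List.slice d (some t) (some (m : Int)) := by
    rw [PySem.List.slice_toNat _ h0 (by positivity), PySem.List.slice_toNat _ h0 (by positivity)]
    simp only [Int.toNat_natCast]
    rw [List.drop_take, List.take_take, Nat.min_self]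
  have hs3 : PySem.List.slice (d.take m) (some 0) (some (m : Int)) =
      PySem.List.slice d none (some (m : Int)) := by
    rw [PySem.List.slice_zero_start, PySem.List.slice_to_natCast, PySem.List.slice_to_natCast,
        List.take_take, Nat.min_self]
  unfold pvHA pvHB
  rw [hs1, hs2, hs3, hIH, pvIdentAB, pvIdentAB]

-- A on the prefix d.take m equals the DP cell value
theorem pvA_eq_bval (d : List (Int × Int)) (k : Int) :
    ∀ fuel m, m ≤ d.length → m < fuel → pvAuxA fuel (d.take m) k = pvBVal fuel d k m := by
  intro fuel
  induction fuel with
  | zero => intro m hm hf; omega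
  | succ fuel ih =>
    intro m hm hf
    have hlen : PySem.List.len (d.take m) = (m : Int) := by
      simp [PySem.List.len_eq, List.length_take, Nat.min_eq_left hm]
    show (let nodesCount : Int := PySem.List.len (d.take m);
      if nodesCount < 2 * k then pvIdenticalA (d.take m)
      else
        let min_t := max k (nodesCount - 2 * k + 1)
        let pairs := (PySem.List.pyRange min_t (nodesCount - k + 1) 1).foldl
          (fun pairs t =>
            let DA := pvAuxA fuel (PySem.List.slice (d.take m) (some 0) (some t)) k
            let DAI := pvIdenticalA (PySem.List.slice (d.take m) (some t) (some nodesCount))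
            let All_cost := DA.1 + DAI.1
            let All_d := DA.2 ++ DAI.2
            let I := pvIdenticalA (PySem.List.slice (d.take m) (some 0) (some nodesCount))
            if All_cost > I.1 then pairs ++ [(I.1, I.2)] else pairs ++ [(All_cost, All_d)]) []
        (PySem.List.min? pairs (fun p => p.1)).getD (0, []))
      = pvCellB d k (fun t => pvBVal fuel d k t.toNat) (m : Int)
    simp only [hlen]
    by_cases hc : (m : Int) < 2 * k
    · rw [if_pos hc]
      unfold pvCellB
      rw [if_pos hc, PySem.List.slice_to_natCast, pvIdentAB]
    · rw [if_neg hc, pvCellB_else d k _ _ hc]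
      have hpairs : (PySem.List.pyRange (max k ((m : Int) - 2 * k + 1)) ((m : Int) - k + 1) 1).foldl
          (fun pairs t =>
            let DA := pvAuxA fuel (PySem.List.slice (d.take m) (some 0) (some t)) k
            let DAI := pvIdenticalA (PySem.List.slice (d.take m) (some t) (some (m : Int)))
            let All_cost := DA.1 + DAI.1
            let All_d := DA.2 ++ DAI.2
            let I := pvIdenticalA (PySem.List.slice (d.take m) (some 0) (some (m : Int)))
            if All_cost > I.1 then pairs ++ [(I.1, I.2)] else pairs ++ [(All_cost, All_d)]) []
          = (PySem.List.pyRange (max k ((m : Int) - 2 * k + 1)) ((m : Int) - k + 1) 1).map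
              (pvHA (d.take m) k fuel (m : Int)) := by
        rw [PySem.List.foldl_congr_mem _ _
          (fun pairs t => pairs ++ [pvHA (d.take m) k fuel (m : Int) t]) []
          (by
            intro acc t _
            unfold pvHA
            dsimp only
            split <;> rfl)]
        exact PySem.List.foldl_append_singleton_eq_map _ _ []
      rw [hpairs, pvMinFold]
      congr 1
      apply PySem.List.foldl_congr_mem
      intro acc t ht
      rw [PySem.List.mem_pyRange_one] at ht
      obtain ⟨hk, hkt, htm⟩ := pvRangeFacts ht.1 ht.2
      have h0 : 0 ≤ t := by omega
      rw [pvElem d k fuel m hm t h0 (by omega)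
        (ih t.toNat (by omega) (by omega))]

-- Source B's table is the table of DP cell values
theorem pvB_table (d : List (Int × Int)) (k : Int) :
    ∀ j, j ≤ d.length + 1 →
      (PySem.List.pyRange 0 (j : Int) 1).foldl
        (fun best m => best ++ [pvCellB d k (fun t => PySem.List.pyGetD best t (0, [])) m]) []
      = (List.range j).map (fun m => pvBVal (d.length + 1) d k m) := by
  intro j
  induction j with
  | zero => intro _; rfl
  | succ j ih =>
    intro hj
    have hcast : ((j + 1 : Nat) : Int) = (j : Int) + 1 := by push_cast; ring
    rw [hcast, PySem.List.pyRange_one_succ_right (by positivity), List.foldl_append]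
    rw [ih (by omega)]
    simp only [List.foldl_cons, List.foldl_nil, List.range_succ, List.map_append, List.map_cons,
      List.map_nil]
    congr 1
    show _ = [pvBVal (d.length + 1) d k j]
    congr 1
    show _ = pvCellB d k (fun t => pvBVal d.length d k t.toNat) (j : Int)
    apply pvCellB_congr
    intro t h1 h2
    obtain ⟨hk, hkt, htm⟩ := pvRangeFacts h1 h2
    have h0 : 0 ≤ t := by omega
    have hlt : t.toNat < j := by omega
    rw [PySem.List.pyGetD_eq_getElem _ _ h0 (by
      simp only [List.length_map, List.length_range]; omega)]
    rw [List.getElem_map, List.getElem_range]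
    exact pvBVal_mono d k t.toNat (d.length + 1) d.length (by omega) (by omega)

-- ===== VERDICT (by name: the statement is the Claim_ definition above) =====
theorem DPA_GetAnonymizedDegrees_Optimized_spec : Claim_equal_DPA_GetAnonymizedDegrees_Optimized := by
  intro d k _ _
  unfold Spec_DPA_GetAnonymizedDegrees_Optimized
  unfold DPA_GetAnonymizedDegrees_Optimized DPA_GetAnonymizedDegrees_Optimized_alt
  have hcast : ((d.length : Int) + 1) = ((d.length + 1 : Nat) : Int) := by push_cast; ring
  rw [hcast, pvB_table d k (d.length + 1) (by omega)]
  have hA := pvA_eq_bval d k (d.length + 1) d.length (le_refl _) (by omega)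
  rw [List.take_length] at hA
  rw [hA]
  rw [PySem.List.pyGetD_eq_getElem _ _ (by positivity) (by
    simp only [List.length_map, List.length_range]; omega)]
  rw [List.getElem_map, List.getElem_range]
  simp
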